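-- pv_equiv track=rewrite | github.com/in-my-ellement/aoc2024 | day6.py | step
-- ===== SOURCE A (Python) =====
-- direction = {
--     "^": (-1, 0),
--     ">": (0, 1),
--     "v": (1, 0),
--     "<": (0, -1)
-- }
--
-- def step(pos, mat):
--     offset = direction[mat[pos[0]][pos[1]]]
--     nextPos = (pos[0] + offset[0], pos[1] + offset[1])
--
--     if nextPos[0] >= len(mat) or nextPos[0] < 0 or nextPos[1] >= len(mat[0]) or nextPos[1] < 0:
--         # base case
--         mat[pos[0]][pos[1]] = "X"
--         return pos[0:2]
--
--     if mat[nextPos[0]][nextPos[1]] == "#":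
--         # rotate
--         i = list(direction.keys()).index(mat[pos[0]][pos[1]])
--         mat[pos[0]][pos[1]] = list(direction.keys())[(i+1) % len(direction)]
--         return step(pos, mat)
--
--     # continue to the next position
--     mat[nextPos[0]][nextPos[1]] = mat[pos[0]][pos[1]]
--     mat[pos[0]][pos[1]] = "X"
--
--     return nextPos
-- ===== SOURCE B (Python) =====
-- direction = {
--     "^": (-1, 0),
--     ">": (0, 1),
--     "v": (1, 0),
--     "<": (0, -1)
-- }
--
-- _ORDER = ("^", ">", "v", "<")
--
-- def step(pos, mat):
--     r, c = pos[0], pos[1]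
--     i = _ORDER.index(mat[r][c])
--     rows, cols = len(mat), len(mat[0])
--     while True:
--         dr, dc = direction[_ORDER[i]]
--         nr, nc = r + dr, c + dc
--         if nr >= rows or nr < 0 or nc >= cols or nc < 0:
--             mat[r][c] = "X"
--             return (r, c)
--         if mat[nr][nc] == "#":
--             i = (i + 1) % 4
--             continue
--         mat[nr][nc] = _ORDER[i]
--         mat[r][c] = "X"
--         return (nr, nc)
-- ===== Notes on version B (the rewrite author's own statement) =====
-- stated objective: alternative
-- what changed: A's recursive re-dispatch, which rewrites the rotated guard character into the grid and rebuilds list(direction.keys()) on every retry, is replaced by an iterative loop that keeps the direction as a rotating index in a local variable and writes to the grid only once, when it returns.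
-- outside the precondition, e.g. on step((0, 0), [['>', '.'], ['#']]): A returns (0, 1), B returns (0, 1)
import Mathlib
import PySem

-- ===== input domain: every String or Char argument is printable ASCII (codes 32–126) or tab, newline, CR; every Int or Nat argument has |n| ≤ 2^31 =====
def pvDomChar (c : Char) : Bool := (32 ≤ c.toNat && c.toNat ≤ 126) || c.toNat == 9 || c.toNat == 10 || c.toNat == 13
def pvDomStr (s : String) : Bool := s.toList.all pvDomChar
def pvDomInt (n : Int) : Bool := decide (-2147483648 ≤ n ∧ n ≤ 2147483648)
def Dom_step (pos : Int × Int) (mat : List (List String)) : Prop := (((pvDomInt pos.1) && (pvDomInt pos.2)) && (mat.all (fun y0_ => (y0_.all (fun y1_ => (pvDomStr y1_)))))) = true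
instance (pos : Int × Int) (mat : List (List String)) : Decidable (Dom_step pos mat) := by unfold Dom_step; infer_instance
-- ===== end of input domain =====

-- step: move/rotate the guard one grid step. B replaces A's recursion (which rewrites the rotated
-- guard character into the grid before each retry) by an iterative loop keeping the direction index
-- in a local variable and writing to the grid only once, on return ("alternative", same cost).
-- Both Pythons mutate `mat` in place identically; the equivalence proved here is about the return value.


-- ===== PORT A =====
-- direction = {"^": (-1,0), ">": (0,1), "v": (1,0), "<": (0,-1)}
def dirKeys : List String := ["^", ">", "v", "<"]
def dirOffs : List (Int × Int) := [(-1, 0), (0, 1), (1, 0), (0, -1)]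
-- direction[s] (none = KeyError)
def dirOff (s : String) : Option (Int × Int) :=
  if s = "^" then some (-1, 0) else if s = ">" then some (0, 1)
  else if s = "v" then some (1, 0) else if s = "<" then some (0, -1) else none
-- mat[i][j] (Python indexing, negative wraps; none = IndexError)
def cellAt (mat : List (List String)) (i j : Int) : Option String :=
  (PySem.List.pyGet? mat i).bind (fun row => PySem.List.pyGet? row j)
-- mat[i][j] = v (Python in-place write; out of range raises in Python — excluded by Pre_, a no-op here)
def setCell (mat : List (List String)) (i j : Int) (v : String) : List (List String) :=
  match PySem.List.pyGet? mat i with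
  | none => mat
  | some row => PySem.List.pySetD mat i (PySem.List.pySetD row j v)

-- A's recursion, fuel-guarded: each rotation rewrites the guard cell and recurses.  When the guard is
-- boxed in by '#' on all four sides the Python recurses forever (outside Pre_); 4 units of fuel cover
-- every terminating run (a 4th rotation would restore the starting state).  The final in-place writes
-- mat[nextPos]=ch / mat[pos]="X" do not affect the returned pair and are not modelled (return-value claim).
def stepA : Nat → (Int × Int) → List (List String) → (Int × Int)
  | 0, pos, _ => pos
  | fuel+1, pos, mat =>
    match (cellAt mat pos.1 pos.2).bind dirOff with
    | none => pos      -- IndexError / KeyError in Python (outside Pre_)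
    | some off =>
      let nextPos : Int × Int := (pos.1 + off.1, pos.2 + off.2)
      if nextPos.1 ≥ (mat.length : Int) ∨ nextPos.1 < 0 ∨
         nextPos.2 ≥ (((mat.headD []).length : Nat) : Int) ∨ nextPos.2 < 0 then
        pos                                           -- base case: return pos[0:2]
      else if cellAt mat nextPos.1 nextPos.2 = some "#" then
        match (cellAt mat pos.1 pos.2).bind (PySem.List.index? dirKeys) with
        | none => pos  -- unreachable: the same cell was read above
        | some i => stepA fuel pos (setCell mat pos.1 pos.2 (dirKeys.getD ((i + 1) % 4) ""))
      else nextPos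

def step (pos : Int × Int) (mat : List (List String)) : Int × Int := stepA 4 pos mat

-- ===== PORT B =====
-- B's while-True loop, fuel-guarded likewise: the direction index rotates locally, mat is never written
-- before returning (the final writes do not affect the returned pair and are not modelled).
def stepBLoop (rows cols : Int) (mat : List (List String)) (r c : Int) : Nat → Nat → (Int × Int)
  | _, 0 => (r, c)
  | i, fuel+1 =>
    let off := dirOffs.getD i (0, 0)
    let nr := r + off.1
    let nc := c + off.2
    if nr ≥ rows ∨ nr < 0 ∨ nc ≥ cols ∨ nc < 0 then (r, c)
    else if cellAt mat nr nc = some "#" then stepBLoop rows cols mat r c ((i + 1) % 4) fuel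
    else (nr, nc)

def step_alt (pos : Int × Int) (mat : List (List String)) : Int × Int :=
  match (cellAt mat pos.1 pos.2).bind (PySem.List.index? dirKeys) with
  | none => pos      -- IndexError / ValueError in Python (outside Pre_)
  | some i => stepBLoop (mat.length : Int) (((mat.headD []).length : Nat) : Int) mat pos.1 pos.2 i 4

-- ===== PRECONDITION & SPEC =====
-- does the move by `off` leave the grid or hit a non-'#' cell? (i.e. the loop stops at this direction)
def escapes (mat : List (List String)) (r c : Int) (off : Int × Int) : Bool :=
  decide (r + off.1 ≥ (mat.length : Int)) || decide (r + off.1 < 0) ||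
  decide (c + off.2 ≥ (((mat.headD []).length : Nat) : Int)) || decide (c + off.2 < 0) ||
  decide (cellAt mat (r + off.1) (c + off.2) ≠ some "#")

-- Pre_ restricts to the natural domain: a RECTANGULAR grid (on ragged grids A may raise IndexError or
-- happen to return), a guard cell holding a direction character (else A raises KeyError), and at least
-- one of the four moves unblocked (else A recurses forever).
def Pre_step (pos : Int × Int) (mat : List (List String)) : Prop :=
  (∀ row ∈ mat, row.length = (mat.headD []).length) ∧
  ((cellAt mat pos.1 pos.2).any (fun ch => dirKeys.contains ch) = true) ∧
  (dirOffs.any (fun off => escapes mat pos.1 pos.2 off) = true)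
instance (pos : Int × Int) (mat : List (List String)) : Decidable (Pre_step pos mat) := by
  unfold Pre_step; infer_instance

def pvWitness_step : (Int × Int) × List (List String) := ((0, 0), [[">", "."]])

def Spec_step (pos : Int × Int) (mat : List (List String)) (out : Int × Int) : Prop := out = step_alt pos mat
instance (pos : Int × Int) (mat : List (List String)) (out : Int × Int) : Decidable (Spec_step pos mat out) := by unfold Spec_step; infer_instance

-- ===== CLAIM (what is proved, stated in full; the proofs are below) =====
def Claim_equal_step : Prop := ∀ (pos : Int × Int) (mat : List (List String)), Dom_step pos mat → Pre_step pos mat → Spec_step pos mat (step pos mat)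

-- ===== LEMMAS AND PROOFS =====

lemma pyIdx?_some_lt {n : Nat} {i : Int} {k : Nat} (h : PySem.List.pyIdx? n i = some k) : k < n := by
  simp only [PySem.List.pyIdx?] at h
  split_ifs at h <;> simp_all <;> omega

lemma pyIdx?_of_nonneg {n : Nat} {i : Int} (h0 : 0 ≤ i) (h : i < (n : Int)) :
    PySem.List.pyIdx? n i = some i.toNat := by
  simp only [PySem.List.pyIdx?]
  split_ifs <;> simp_all <;> omega

lemma dirOff_getD {i : Nat} (hi : i < 4) :
    dirOff (dirKeys.getD i "") = some (dirOffs.getD i (0, 0)) := by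
  interval_cases i <;> decide

lemma index?_getD {i : Nat} (hi : i < 4) :
    PySem.List.index? dirKeys (dirKeys.getD i "") = some i := by
  interval_cases i <;> decide

lemma getD_ne_hash {i : Nat} (hi : i < 4) : dirKeys.getD i "" ≠ "#" := by
  interval_cases i <;> decide

lemma mem_dirKeys_index {ch : String} (h : ch ∈ dirKeys) :
    ∃ i, i < 4 ∧ PySem.List.index? dirKeys ch = some i ∧ dirKeys.getD i "" = ch := by
  simp only [dirKeys, List.mem_cons, List.mem_singleton, List.not_mem_nil, or_false] at h
  rcases h with h | h | h | h <;> subst h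
  · exact ⟨0, by decide⟩
  · exact ⟨1, by decide⟩
  · exact ⟨2, by decide⟩
  · exact ⟨3, by decide⟩

lemma mem_dirOffs_getD {off : Int × Int} (h : off ∈ dirOffs) :
    ∃ t, t < 4 ∧ dirOffs.getD t (0, 0) = off := by
  simp only [dirOffs, List.mem_cons, List.mem_singleton, List.not_mem_nil, or_false] at h
  rcases h with h | h | h | h <;> subst h
  · exact ⟨0, by decide⟩
  · exact ⟨1, by decide⟩
  · exact ⟨2, by decide⟩
  · exact ⟨3, by decide⟩

-- the head row of mat.set keeps its length
lemma headD_set_length (mat : List (List String)) (kr : Nat) (row nr : List String)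
    (hrow : mat[kr]? = some row) (hlen : nr.length = row.length) :
    ((mat.set kr nr).headD []).length = (mat.headD []).length := by
  cases mat with
  | nil => simp at hrow
  | cons a l =>
    cases kr with
    | zero => simp_all
    | succ k => simp [List.set_cons_succ]

-- reading the written cell back (same Python indices r,c)
lemma cellAt_set_self (mat : List (List String)) (r c : Int) (row : List String) (kr kc : Nat) (v : String)
    (hkr : PySem.List.pyIdx? mat.length r = some kr) (hrow : mat[kr]? = some row)
    (hkc : PySem.List.pyIdx? row.length c = some kc) :
    cellAt (mat.set kr (row.set kc v)) r c = some v := by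
  have h1 : kr < mat.length := pyIdx?_some_lt hkr
  have h2 : kc < row.length := pyIdx?_some_lt hkc
  simp [cellAt, PySem.List.pyGet?, hkr, hrow, hkc, List.getElem?_set_self, h1, h2]

-- writing the guard cell twice = writing it once
lemma setCell_set (mat : List (List String)) (r c : Int) (row : List String) (kr kc : Nat) (v w : String)
    (hkr : PySem.List.pyIdx? mat.length r = some kr) (hrow : mat[kr]? = some row)
    (hkc : PySem.List.pyIdx? row.length c = some kc) :
    setCell (mat.set kr (row.set kc v)) r c w = mat.set kr (row.set kc w) := by
  have h1 : kr < mat.length := pyIdx?_some_lt hkr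
  have h2 : kc < row.length := pyIdx?_some_lt hkc
  simp [setCell, PySem.List.pyGet?, PySem.List.pySetD, PySem.List.pySet?, hkr, hrow, hkc, h1, h2,
        List.set_set]

-- reading any in-bounds cell of the grid after the guard-cell write
lemma cellAt_set_inbounds (mat : List (List String)) (row : List String) (kr kc : Nat) (v : String)
    (hrect : ∀ rw ∈ mat, rw.length = (mat.headD []).length)
    (hrow : mat[kr]? = some row) (hkc : kc < row.length)
    (i' j' : Int) (h0i : 0 ≤ i') (hi : i' < (mat.length : Int))
    (h0j : 0 ≤ j') (hj : j' < (((mat.headD []).length : Nat) : Int)) :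
    cellAt (mat.set kr (row.set kc v)) i' j' =
      if i'.toNat = kr ∧ j'.toNat = kc then some v else cellAt mat i' j' := by
  have hkrlt : kr < mat.length := (List.getElem?_eq_some_iff.mp hrow).1
  have hrmem : row ∈ mat := List.mem_of_getElem? hrow
  have hrl : row.length = (mat.headD []).length := hrect row hrmem
  have hidx : PySem.List.pyIdx? mat.length i' = some i'.toNat := pyIdx?_of_nonneg h0i (by exact_mod_cast hi)
  have hilt : i'.toNat < mat.length := by omega
  obtain ⟨rowi, hrowi⟩ : ∃ rowi, mat[i'.toNat]? = some rowi := by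
    exact ⟨mat[i'.toNat], List.getElem?_eq_getElem hilt⟩
  have hrli : rowi.length = (mat.headD []).length := hrect rowi (List.mem_of_getElem? hrowi)
  have hjlt : j'.toNat < rowi.length := by omega
  have hidxj : PySem.List.pyIdx? rowi.length j' = some j'.toNat :=
    pyIdx?_of_nonneg h0j (by omega)
  by_cases hik : i'.toNat = kr
  · subst hik
    have hroweq : rowi = row := by rw [hrowi] at hrow; exact Option.some_inj.mp hrow
    subst hroweq
    have hidxj2 : PySem.List.pyIdx? (rowi.set kc v).length j' = some j'.toNat := by
      simpa using hidxj
    by_cases hjk : j'.toNat = kc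
    · subst hjk
      simp only [cellAt, PySem.List.pyGet?, List.length_set]
      rw [hidx, Option.bind_some, List.getElem?_set_self hilt, Option.bind_some,
          hidxj2, Option.bind_some, List.getElem?_set_self hjlt]
      simp
    · simp only [cellAt, PySem.List.pyGet?, List.length_set]
      rw [hidx, Option.bind_some, List.getElem?_set_self hilt, Option.bind_some,
          hidxj2, Option.bind_some, List.getElem?_set_ne (by omega : kc ≠ j'.toNat)]
      simp [hrowi, hidxj, hjk]
  · simp only [cellAt, PySem.List.pyGet?, List.length_set]
    rw [hidx, Option.bind_some, List.getElem?_set_ne (fun h => hik h.symm)]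
    simp [hik]

-- the original in-bounds cell read, through nonneg indices
lemma cellAt_orig (mat : List (List String)) (row : List String) (kr kc : Nat) (ch0 : String)
    (hrow : mat[kr]? = some row) (hch0 : row[kc]? = some ch0)
    (i' j' : Int) (hik : i'.toNat = kr) (hjk : j'.toNat = kc) (h0i : 0 ≤ i') (h0j : 0 ≤ j') :
    cellAt mat i' j' = some ch0 := by
  have hkrlt : kr < mat.length := (List.getElem?_eq_some_iff.mp hrow).1
  have hkclt : kc < row.length := (List.getElem?_eq_some_iff.mp hch0).1
  have hidx : PySem.List.pyIdx? mat.length i' = some i'.toNat := pyIdx?_of_nonneg h0i (by omega)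
  have hidxj : PySem.List.pyIdx? row.length j' = some j'.toNat := pyIdx?_of_nonneg h0j (by omega)
  simp [cellAt, PySem.List.pyGet?, hidx, hik, hrow, hidxj, hjk, hch0]

lemma mem_dirKeys_ne_hash {ch : String} (h : ch ∈ dirKeys) : ch ≠ "#" := by
  simp only [dirKeys, List.mem_cons, List.not_mem_nil, or_false] at h
  rcases h with h | h | h | h <;> subst h <;> decide

-- MAIN LEMMA: A's recursion on the grid with the guard cell rewritten to direction i equals B's loop
-- carrying i, as long as some tried direction escapes within the available fuel.
lemma loop_eq (mat : List (List String)) (r c : Int) (row : List String) (kr kc : Nat) (ch0 : String)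
    (hrect : ∀ rw ∈ mat, rw.length = (mat.headD []).length)
    (hkr : PySem.List.pyIdx? mat.length r = some kr) (hrow : mat[kr]? = some row)
    (hkc : PySem.List.pyIdx? row.length c = some kc) (hch0 : row[kc]? = some ch0)
    (hmem : ch0 ∈ dirKeys) :
    ∀ (fuel i : Nat), i < 4 →
      (∃ j, j < fuel ∧ escapes mat r c (dirOffs.getD ((i + j) % 4) (0, 0)) = true) →
      stepA fuel (r, c) (mat.set kr (row.set kc (dirKeys.getD i ""))) =
        stepBLoop (mat.length : Int) (((mat.headD []).length : Nat) : Int) mat r c i fuel := by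
  intro fuel
  induction fuel with
  | zero => intro i hi h; exact absurd h (by simp)
  | succ fuel ih =>
    intro i hi hesc
    have h1 : kr < mat.length := pyIdx?_some_lt hkr
    have h2 : kc < row.length := pyIdx?_some_lt hkc
    have hcell : cellAt (mat.set kr (row.set kc (dirKeys.getD i ""))) r c
        = some (dirKeys.getD i "") := cellAt_set_self mat r c row kr kc _ hkr hrow hkc
    have hoffv : dirOff (dirKeys.getD i "") = some (dirOffs.getD i (0, 0)) := dirOff_getD hi
    have hlen : (mat.set kr (row.set kc (dirKeys.getD i ""))).length = mat.length :=
      List.length_set ..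
    have hhead : (((mat.set kr (row.set kc (dirKeys.getD i ""))).headD []).length)
        = ((mat.headD []).length) := headD_set_length mat kr row _ hrow (by simp)
    simp only [stepA, stepBLoop, hcell, Option.bind_some, hoffv, hlen, hhead]
    by_cases hb : (r + (dirOffs.getD i (0, 0)).1 ≥ (mat.length : Int) ∨
        r + (dirOffs.getD i (0, 0)).1 < 0 ∨
        c + (dirOffs.getD i (0, 0)).2 ≥ (((mat.headD []).length : Nat) : Int) ∨
        c + (dirOffs.getD i (0, 0)).2 < 0)
    · rw [if_pos hb, if_pos hb]
    · rw [if_neg hb, if_neg hb]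
      push_neg at hb
      obtain ⟨hb1, hb2, hb3, hb4⟩ := hb
      have hset := cellAt_set_inbounds mat row kr kc (dirKeys.getD i "") hrect hrow h2
        (r + (dirOffs.getD i (0, 0)).1) (c + (dirOffs.getD i (0, 0)).2) hb2 hb1 hb4 hb3
      by_cases halias : ((r + (dirOffs.getD i (0, 0)).1).toNat = kr ∧
          (c + (dirOffs.getD i (0, 0)).2).toNat = kc)
      · -- the move lands (after wraparound) on the guard cell itself: a direction char, never '#'
        rw [if_pos halias] at hset
        have horig : cellAt mat (r + (dirOffs.getD i (0, 0)).1) (c + (dirOffs.getD i (0, 0)).2)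
            = some ch0 := cellAt_orig mat row kr kc ch0 hrow hch0 _ _ halias.1 halias.2 hb2 hb4
        rw [if_neg (fun h => getD_ne_hash hi (Option.some_inj.mp (hset.symm.trans h))),
            if_neg (fun h => mem_dirKeys_ne_hash hmem (Option.some_inj.mp (horig.symm.trans h)))]
      · rw [if_neg halias] at hset
        by_cases hash : cellAt mat (r + (dirOffs.getD i (0, 0)).1) (c + (dirOffs.getD i (0, 0)).2)
            = some "#"
        · -- blocked: A rewrites the guard cell and recurses, B bumps the index
          rw [if_pos (hset.trans hash), if_pos hash, index?_getD hi]
          show stepA fuel (r, c) (setCell (mat.set kr (row.set kc (dirKeys.getD i "")))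
              r c (dirKeys.getD ((i + 1) % 4) "")) = _
          rw [setCell_set mat r c row kr kc _ _ hkr hrow hkc]
          obtain ⟨j, hj, hej⟩ := hesc
          have hj0 : j ≠ 0 := by
            rintro rfl
            rw [Nat.add_zero, Nat.mod_eq_of_lt hi] at hej
            simp only [escapes, Bool.or_eq_true, decide_eq_true_eq] at hej
            rcases hej with (((h | h) | h) | h) | h
            · omega
            · omega
            · omega
            · omega
            · exact h hash
          exact ih ((i + 1) % 4) (Nat.mod_lt _ (by omega))
            ⟨j - 1, by omega, by
              have : ((i + 1) % 4 + (j - 1)) % 4 = (i + j) % 4 := by omega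
              rw [this]; exact hej⟩
        · rw [if_neg (fun h => hash (hset.symm.trans h)), if_neg hash]

-- setting a cell to its current value is the identity
lemma set_self_id (mat : List (List String)) (row : List String) (kr kc : Nat) (ch0 : String)
    (hrow : mat[kr]? = some row) (hch0 : row[kc]? = some ch0) :
    mat.set kr (row.set kc ch0) = mat := by
  have h1 : kr < mat.length := (List.getElem?_eq_some_iff.mp hrow).1
  have h2 : kc < row.length := (List.getElem?_eq_some_iff.mp hch0).1
  have hr : mat[kr] = row := (List.getElem?_eq_some_iff.mp hrow).2
  have hc : row[kc] = ch0 := (List.getElem?_eq_some_iff.mp hch0).2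
  rw [← hc, List.set_getElem_self, ← hr, List.set_getElem_self]

-- ===== VERDICT (by name: the statement is the Claim_ definition above) =====
theorem step_spec : Claim_equal_step := by
  unfold Claim_equal_step
  intro pos mat _hdom hpre
  unfold Spec_step
  obtain ⟨hrect, hcellok, hescape⟩ := hpre
  cases hc : cellAt mat pos.1 pos.2 with
  | none => rw [hc] at hcellok; simp at hcellok
  | some ch0 =>
    rw [hc] at hcellok
    have hmem : ch0 ∈ dirKeys := by simpa using hcellok
    cases hg : PySem.List.pyGet? mat pos.1 with
    | none => rw [cellAt, hg] at hc; simp at hc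
    | some row =>
      have hg2 : PySem.List.pyGet? row pos.2 = some ch0 := by
        rw [cellAt, hg] at hc; simpa using hc
      cases hkr : PySem.List.pyIdx? mat.length pos.1 with
      | none => rw [PySem.List.pyGet?, hkr] at hg; simp at hg
      | some kr =>
        have hrow : mat[kr]? = some row := by
          rw [PySem.List.pyGet?, hkr] at hg; simpa using hg
        cases hkc : PySem.List.pyIdx? row.length pos.2 with
        | none => rw [PySem.List.pyGet?, hkc] at hg2; simp at hg2
        | some kc =>
          have hch0cell : row[kc]? = some ch0 := by
            rw [PySem.List.pyGet?, hkc] at hg2; simpa using hg2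
          obtain ⟨i0, hi0lt, hidx0, hgetD⟩ := mem_dirKeys_index hmem
          rw [List.any_eq_true] at hescape
          obtain ⟨off, hoffmem, hesc⟩ := hescape
          obtain ⟨t, ht, htoff⟩ := mem_dirOffs_getD hoffmem
          have hescj : ∃ j, j < 4 ∧
              escapes mat pos.1 pos.2 (dirOffs.getD ((i0 + j) % 4) (0, 0)) = true :=
            ⟨(t + 4 - i0) % 4, by omega, by
              have hmod : (i0 + (t + 4 - i0) % 4) % 4 = t := by omega
              rw [hmod, htoff]; exact hesc⟩
          have hmain := loop_eq mat pos.1 pos.2 row kr kc ch0 hrect hkr hrow hkc hch0cell hmem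
            4 i0 hi0lt hescj
          rw [hgetD, set_self_id mat row kr kc ch0 hrow hch0cell] at hmain
          unfold step step_alt
          rw [hc]
          show stepA 4 (pos.1, pos.2) mat =
            (match (some ch0).bind (PySem.List.index? dirKeys) with
             | none => pos
             | some i => stepBLoop (mat.length : Int) (((mat.headD []).length : Nat) : Int)
                 mat pos.1 pos.2 i 4)
          rw [Option.bind_some, hidx0]
          exact hmain
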